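-- pv_equiv track=rewrite | github.com/jero98772/TMPland | core/tools/criptools.py | decpalabranum
-- ===== SOURCE A (Python) =====
-- letras = "abcdefghijklmnopqrstuvwxyz"
--
-- numcode = ['22', '222', '2222', '33', '333', '3333', '44', '444', '4444', '55', '555', '5555', '66', '666', '6666', '77', '777', '7777', '77777', '88', '888', '8888', '99', '999', '9999', '99999']
--
-- def decpalabranum(palbraenc):
-- 	palabra = ""
-- 	caracter = ""
-- 	for i in palbraenc:
-- 		if i ==  ",":
-- 			if caracter == "00":
-- 				palabra += " "
-- 			else:
-- 				try:
-- 					palabra += letras[numcode.index(caracter)]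
-- 				except:
-- 					palabra += str(caracter)
-- 			caracter = ""
-- 		else:
-- 			caracter+=i
-- 	return palabra
-- ===== SOURCE B (Python) =====
-- letras = "abcdefghijklmnopqrstuvwxyz"
--
-- numcode = ['22', '222', '2222', '33', '333', '3333', '44', '444', '4444', '55', '555', '5555', '66', '666', '6666', '77', '777', '7777', '77777', '88', '888', '8888', '99', '999', '9999', '99999']
--
-- _DECMAP = {code: letter for code, letter in zip(numcode, letras)}
-- _DECMAP['00'] = ' '
--
-- def decpalabranum(palbraenc):
--     tokens = palbraenc.split(',')
--     return ''.join(_DECMAP.get(t, t) for t in tokens[:-1])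
-- ===== Notes on version B (the rewrite author's own statement) =====
-- stated objective: faster
-- what changed: Replaces the char-by-char accumulate-and-flush state machine (with a try/except linear scan of the 26-entry code table per token) by tokenizing on the comma separator, dropping the trailing unterminated segment, and mapping each token through a precomputed dict.
import Mathlib
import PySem

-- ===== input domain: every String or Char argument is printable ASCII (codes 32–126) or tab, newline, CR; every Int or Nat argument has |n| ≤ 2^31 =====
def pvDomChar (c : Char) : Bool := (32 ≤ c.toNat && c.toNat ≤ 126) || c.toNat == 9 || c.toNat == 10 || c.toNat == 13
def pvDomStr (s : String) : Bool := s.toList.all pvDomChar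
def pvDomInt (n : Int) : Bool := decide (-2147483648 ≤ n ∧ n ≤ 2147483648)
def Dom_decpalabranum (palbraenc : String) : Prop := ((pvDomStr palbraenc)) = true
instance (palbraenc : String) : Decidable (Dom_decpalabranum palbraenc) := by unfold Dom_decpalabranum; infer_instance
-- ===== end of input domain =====

-- ===== PORT A =====
-- B tokenizes with split(',') and maps tokens through a precomputed dict instead of
-- A's char-by-char accumulate-and-flush state machine; return values are proved equal.
def pvLetras : String := "abcdefghijklmnopqrstuvwxyz"

def pvNumcode : List String := ["22", "222", "2222", "33", "333", "3333", "44", "444", "4444", "55", "555", "5555", "66", "666", "6666", "77", "777", "7777", "77777", "88", "888", "8888", "99", "999", "9999", "99999"]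

-- the body of A's for-loop: on ',' flush the accumulated caracter, else extend it
def pvStepA (st : String × String) (i : Char) : String × String :=
  if i = ',' then
    (if st.2 = "00" then st.1 ++ " "
     else
       -- try: letras[numcode.index(caracter)]  except: str(caracter)
       match PySem.List.index? pvNumcode st.2 with
       | some j =>
         match PySem.List.pyGet? pvLetras.toList (j : Int) with
         | some c => st.1 ++ String.ofList [c]
         | none => st.1 ++ st.2
       | none => st.1 ++ st.2,
     "")
  else (st.1, st.2.push i)

def decpalabranum (palbraenc : String) : String :=
  (palbraenc.toList.foldl pvStepA ("", "")).1

-- ===== PORT B =====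
-- _DECMAP = {code: letter for code, letter in zip(numcode, letras)}; _DECMAP['00'] = ' '
def pvDecmap : PySem.Dict String String :=
  ((pvNumcode.zip (pvLetras.toList.map (fun c => String.ofList [c]))).foldl
    (fun d p => d.insert p.1 p.2) PySem.Dict.empty).insert "00" " "

def decpalabranum_alt (palbraenc : String) : String :=
  -- palbraenc.split(',') : separator nonempty, so split? always returns some
  let tokens := (PySem.Str.split? palbraenc ",").getD []
  PySem.Str.join "" ((PySem.List.slice tokens none (some (-1))).map
    (fun t => pvDecmap.getD t t))

-- ===== PRECONDITION & SPEC =====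
def Spec_decpalabranum (palbraenc : String) (out : String) : Prop := out = decpalabranum_alt palbraenc
instance (palbraenc : String) (out : String) : Decidable (Spec_decpalabranum palbraenc out) := by unfold Spec_decpalabranum; infer_instance

-- ===== CLAIM (what is proved, stated in full; the proofs are below) =====
def Claim_equal_decpalabranum : Prop := ∀ (palbraenc : String), Dom_decpalabranum palbraenc → Spec_decpalabranum palbraenc (decpalabranum palbraenc)

-- ===== LEMMAS AND PROOFS =====

-- reference splitter: sc l cur = remaining segments of l, cur being the current
-- (reversed) partial segment — mirrors PySem.Chars.splitOn.go for the 1-char sep ","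
def pvSc : List Char → List Char → List (List Char)
  | [], cur => [cur.reverse]
  | x :: rest, cur => if x = ',' then cur.reverse :: pvSc rest [] else pvSc rest (x :: cur)

theorem pvSc_ne_nil (l cur : List Char) : pvSc l cur ≠ [] := by
  induction l generalizing cur with
  | nil => simp [pvSc]
  | cons x rest ih => simp only [pvSc]; split <;> simp [ih]

theorem pvGo_eq (fuel : Nat) (l cur acc : List Char) (accs : List (List Char))
    (h : l.length ≤ fuel) :
    PySem.Chars.splitOn.go [','] fuel l cur accs = accs.reverse ++ pvSc l cur := by
  induction fuel generalizing l cur accs with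
  | zero =>
    have : l = [] := by cases l <;> simp_all
    subst this
    simp [PySem.Chars.splitOn.go, pvSc]
  | succ n ih =>
    cases l with
    | nil => simp [PySem.Chars.splitOn.go, pvSc]
    | cons x rest =>
      simp only [PySem.Chars.splitOn.go, pvSc]
      by_cases hx : x = ','
      · subst hx
        simp only [List.isPrefixOf, List.length_cons] at h ⊢
        simp only [BEq.rfl, Bool.and_self, if_pos, if_true,
          ih rest [] (List.reverse cur :: accs) (by omega), List.drop_succ_cons,
          List.drop_zero, List.length_cons, List.length_nil]
        simp
      · have hpre : List.isPrefixOf [','] (x :: rest) = false := by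
          simp [List.isPrefixOf]; intro hc; exact absurd hc.symm hx
        simp only [hpre, if_neg, Bool.false_eq_true, if_false, if_neg hx]
        exact ih rest (x :: cur) accs (by simpa using Nat.le_of_succ_le_succ h)

theorem pvSplitOn_eq (l : List Char) :
    PySem.Chars.splitOn l [','] = pvSc l [] := by
  simpa using pvGo_eq (l.length + 1) l [] [] [] (by omega)

theorem pvSlice_dropLast {α : Type} (xs : List α) :
    PySem.List.slice xs none (some (-1)) = xs.dropLast := by
  simp only [PySem.List.slice, PySem.List.clampIdx, List.dropLast_eq_take]
  cases xs with
  | nil => simp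
  | cons y ys =>
    norm_num
    rw [if_neg (by omega : ¬((ys.length : Int) < 0))]
    omega

theorem pvJoin_empty_cons (t : String) (ts : List String) :
    PySem.Str.join "" (t :: ts) = t ++ PySem.Str.join "" ts := by
  cases ts with
  | nil => simp [PySem.Str.join, PySem.Chars.join, List.intercalate]
  | cons u us =>
    simp [PySem.Str.join, PySem.Chars.join, List.intercalate]

-- the per-token decode of A equals B's dict lookup, for every string
theorem pvTok_eq (t : String) :
    (if t = "00" then " "
     else match PySem.List.index? pvNumcode t with
       | some j =>
         match PySem.List.pyGet? pvLetras.toList (j : Int) with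
         | some c => String.ofList [c]
         | none => t
       | none => t) = pvDecmap.getD t t := by
  by_cases h00 : t = "00"
  · subst h00; decide
  · rw [if_neg h00]
    by_cases hm : t ∈ pvNumcode
    · simp only [pvNumcode, List.mem_cons, List.not_mem_nil, or_false] at hm
      rcases hm with h|h|h|h|h|h|h|h|h|h|h|h|h|h|h|h|h|h|h|h|h|h|h|h|h|h <;> subst h <;> decide
    · have hidx : PySem.List.index? pvNumcode t = none := by
        simp [PySem.List.index?, List.idxOf?_eq_none_iff, hm]
      rw [hidx]
      have hd : pvDecmap = PySem.Dict.mk [("22","a"),("222","b"),("2222","c"),("33","d"),("333","e"),("3333","f"),("44","g"),("444","h"),("4444","i"),("55","j"),("555","k"),("5555","l"),("66","m"),("666","n"),("6666","o"),("77","p"),("777","q"),("7777","r"),("77777","s"),("88","t"),("888","u"),("8888","v"),("99","w"),("999","x"),("9999","y"),("99999","z"),("00"," ")] := by decide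
      simp only [pvNumcode, List.mem_cons, List.not_mem_nil, or_false, not_or] at hm
      obtain ⟨h1,h2,h3,h4,h5,h6,h7,h8,h9,h10,h11,h12,h13,h14,h15,h16,h17,h18,h19,h20,h21,h22,h23,h24,h25,h26⟩ := hm
      rw [hd]
      simp [PySem.Dict.getD_eq_get?_getD, PySem.Dict.get?_mk_cons, Ne.symm h1, Ne.symm h2, Ne.symm h3, Ne.symm h4, Ne.symm h5, Ne.symm h6, Ne.symm h7, Ne.symm h8, Ne.symm h9, Ne.symm h10, Ne.symm h11, Ne.symm h12, Ne.symm h13, Ne.symm h14, Ne.symm h15, Ne.symm h16, Ne.symm h17, Ne.symm h18, Ne.symm h19, Ne.symm h20, Ne.symm h21, Ne.symm h22, Ne.symm h23, Ne.symm h24, Ne.symm h25, Ne.symm h26, Ne.symm h00, PySem.Dict.get?]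

theorem pvStepA_comma (p c : String) :
    pvStepA (p, c) ',' = (p ++ pvDecmap.getD c c, "") := by
  rw [← pvTok_eq c]
  by_cases h : c = "00"
  · simp [pvStepA, h]
  · simp only [pvStepA, if_pos rfl, if_neg h]
    cases hidx : PySem.List.index? pvNumcode c with
    | none => simp
    | some j =>
      simp only [PySem.List.pyGet?_natCast]
      cases pvLetras.toList[j]? <;> simp

theorem pvMain (cs : List Char) (p c : String) :
    (cs.foldl pvStepA (p, c)).1 =
      p ++ PySem.Str.join "" (((pvSc cs c.toList.reverse).dropLast).map
        (fun l => pvDecmap.getD (String.ofList l) (String.ofList l))) := by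
  induction cs generalizing p c with
  | nil =>
    simp [pvSc, PySem.Str.join, PySem.Chars.join, List.intercalate]
  | cons x rest ih =>
    by_cases hx : x = ','
    · subst hx
      have hsc : pvSc (',' :: rest) c.toList.reverse = c.toList :: pvSc rest [] := by
        simp [pvSc]
      simp only [List.foldl_cons, pvStepA_comma, ih, hsc]
      rw [List.dropLast_cons_of_ne_nil (pvSc_ne_nil rest [])]
      simp only [List.map_cons, pvJoin_empty_cons, String.ofList_toList,
        String.toList_empty, List.reverse_nil]
      simp [String.append_assoc]
    · have hstep : pvStepA (p, c) x = (p, c.push x) := by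
        simp [pvStepA, hx]
      simp only [List.foldl_cons, hstep, pvSc, if_neg hx, ih]
      congr 2
      simp [String.toList_push]

-- ===== VERDICT (by name: the statement is the Claim_ definition above) =====
theorem decpalabranum_spec : Claim_equal_decpalabranum := by
  intro s _
  unfold Spec_decpalabranum decpalabranum decpalabranum_alt
  have hsplit : PySem.Str.split? s "," = some ((pvSc s.toList []).map String.ofList) := by
    simp [PySem.Str.split?, PySem.Chars.split?, pvSplitOn_eq]
  rw [pvMain s.toList "" "", hsplit]
  simp only [Option.getD_some, pvSlice_dropLast, ← List.map_dropLast, List.map_map]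
  simp [Function.comp_def]
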